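-- pv_equiv track=rewrite | github.com/imlock/codestat | codestat.py | proj_author_stat_sum_by_proj
-- ===== SOURCE A (Python) =====
-- SEP_PROJ_AUTHOR_KEY = ":"
--
-- def proj_author_stat_sum_by_proj(stat):
-- 	tmp_proj_stat = {}
-- 	for pa in stat:
-- 		proj = pa.split(SEP_PROJ_AUTHOR_KEY)[0]
-- 		if proj in tmp_proj_stat:
-- 			# 累计这个项目的lines
-- 			tmp_proj_stat[proj][0] += stat[pa][1]
-- 			# 累计这个项目的commits
-- 			tmp_proj_stat[proj][1] += stat[pa][2]
-- 		else:
-- 			# 放入这个项目的第一行数据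
-- 			tmp_proj_stat[proj] = [stat[pa][1], stat[pa][2]]
-- 	return tmp_proj_stat
-- ===== SOURCE B (Python) =====
-- SEP_PROJ_AUTHOR_KEY = ":"
--
-- def proj_author_stat_sum_by_proj(stat):
-- 	projs = list(dict.fromkeys(pa.split(SEP_PROJ_AUTHOR_KEY)[0] for pa in stat))
-- 	return {proj: [sum(row[1] for pa, row in stat.items()
-- 	                   if pa.split(SEP_PROJ_AUTHOR_KEY)[0] == proj),
-- 	               sum(row[2] for pa, row in stat.items()
-- 	                   if pa.split(SEP_PROJ_AUTHOR_KEY)[0] == proj)]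
-- 	        for proj in projs}
-- ===== Notes on version B (the rewrite author's own statement) =====
-- stated objective: alternative
-- what changed: Replaces A's single hash-accumulate pass (build a dict, branching on whether the project key is already present and updating its running [lines, commits] entry in place) by a two-phase decomposition: first dedup the project prefixes in first-seen order with dict.fromkeys, then build each project's [lines, commits] entry directly by summing comprehensions over the items.
-- outside the precondition, e.g. on proj_author_stat_sum_by_proj({'web:alice': [1, 2]}): A raises IndexError, B raises IndexError
import Mathlib
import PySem

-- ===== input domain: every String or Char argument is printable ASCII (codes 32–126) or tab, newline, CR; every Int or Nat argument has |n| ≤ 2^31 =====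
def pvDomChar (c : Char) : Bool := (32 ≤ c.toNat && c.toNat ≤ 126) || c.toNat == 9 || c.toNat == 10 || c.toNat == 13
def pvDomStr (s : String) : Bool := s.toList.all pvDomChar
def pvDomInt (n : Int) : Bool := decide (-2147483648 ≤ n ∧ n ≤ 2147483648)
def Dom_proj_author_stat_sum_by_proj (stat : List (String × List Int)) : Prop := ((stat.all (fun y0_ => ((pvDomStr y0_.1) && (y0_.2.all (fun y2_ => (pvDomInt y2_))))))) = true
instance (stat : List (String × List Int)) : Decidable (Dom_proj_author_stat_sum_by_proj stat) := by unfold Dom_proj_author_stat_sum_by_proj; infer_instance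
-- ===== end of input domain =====

-- B replaces A's single hash-accumulate pass by a different decomposition: dedup the project
-- prefixes in first-seen order, then build each project's [lines, commits] entry by summing
-- comprehensions over the items (objective: alternative, not faster).

-- shared helper: SEP_PROJ_AUTHOR_KEY and pa.split(SEP_PROJ_AUTHOR_KEY)[0]
def SEP_PROJ_AUTHOR_KEY : String := ":"
def pvProj (pa : String) : String :=
  -- pa.split(":")[0]; split? is none only for sep = "", and the result is never empty,
  -- so the Option/[0] defaults are never used
  PySem.List.pyGetD ((PySem.Str.split? pa SEP_PROJ_AUTHOR_KEY).getD []) 0 ""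

-- ===== PORT A =====
def proj_author_stat_sum_by_proj (stat : List (String × List Int)) : List (String × List Int) :=
  (stat.foldl (fun tmp_proj_stat pa =>
      let proj := pvProj pa.1
      if tmp_proj_stat.contains proj then
        -- tmp[proj][0] += stat[pa][1]; tmp[proj][1] += stat[pa][2]  (in-place list update)
        let cur := tmp_proj_stat.getD proj []
        tmp_proj_stat.insert proj
          [PySem.List.pyGetD cur 0 0 + PySem.List.pyGetD pa.2 1 0,
           PySem.List.pyGetD cur 1 0 + PySem.List.pyGetD pa.2 2 0]
      else
        tmp_proj_stat.insert proj
          [PySem.List.pyGetD pa.2 1 0, PySem.List.pyGetD pa.2 2 0])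
    PySem.Dict.empty).items

-- ===== PORT B =====
def proj_author_stat_sum_by_proj_alt (stat : List (String × List Int)) : List (String × List Int) :=
  let projs := PySem.List.dedup (stat.map (fun pa => pvProj pa.1))
  projs.map (fun proj =>
    (proj,
     [((stat.filter (fun pa => pvProj pa.1 == proj)).map (fun pa => PySem.List.pyGetD pa.2 1 0)).sum,
      ((stat.filter (fun pa => pvProj pa.1 == proj)).map (fun pa => PySem.List.pyGetD pa.2 2 0)).sum]))

-- ===== PRECONDITION & SPEC =====
-- Pre_ excludes inputs on which some value list has fewer than 3 entries: there Python A
-- (and Python B alike) raises IndexError on row[1]/row[2].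
def Pre_proj_author_stat_sum_by_proj (stat : List (String × List Int)) : Prop :=
  ∀ pa ∈ stat, 3 ≤ pa.2.length
instance (stat : List (String × List Int)) : Decidable (Pre_proj_author_stat_sum_by_proj stat) := by unfold Pre_proj_author_stat_sum_by_proj; infer_instance

def pvWitness_proj_author_stat_sum_by_proj : (List (String × List Int)) :=
  [("web:alice", [0, 10, 2]), ("web:bob", [0, 5, 1]), ("db:alice", [0, 7, 3])]

def Spec_proj_author_stat_sum_by_proj (stat : List (String × List Int)) (out : List (String × List Int)) : Prop := out = proj_author_stat_sum_by_proj_alt stat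
instance (stat : List (String × List Int)) (out : List (String × List Int)) : Decidable (Spec_proj_author_stat_sum_by_proj stat out) := by unfold Spec_proj_author_stat_sum_by_proj; infer_instance

-- ===== CLAIM (what is proved, stated in full; the proofs are below) =====
def Claim_equal_proj_author_stat_sum_by_proj : Prop := ∀ (stat : List (String × List Int)), Dom_proj_author_stat_sum_by_proj stat → Pre_proj_author_stat_sum_by_proj stat → Spec_proj_author_stat_sum_by_proj stat (proj_author_stat_sum_by_proj stat)

-- ===== LEMMAS AND PROOFS =====

-- A's loop body, rewritten as a single Dict.modify (the contains-branch computes exactly this)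
def pvStepM (d : PySem.Dict String (List Int)) (pa : String × List Int) : PySem.Dict String (List Int) :=
  d.modify (pvProj pa.1) [0, 0] (fun cur =>
    [PySem.List.pyGetD cur 0 0 + PySem.List.pyGetD pa.2 1 0,
     PySem.List.pyGetD cur 1 0 + PySem.List.pyGetD pa.2 2 0])

lemma pvStepA_eq_stepM :
    (fun (tmp_proj_stat : PySem.Dict String (List Int)) (pa : String × List Int) =>
      let proj := pvProj pa.1
      if tmp_proj_stat.contains proj then
        let cur := tmp_proj_stat.getD proj []
        tmp_proj_stat.insert proj
          [PySem.List.pyGetD cur 0 0 + PySem.List.pyGetD pa.2 1 0,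
           PySem.List.pyGetD cur 1 0 + PySem.List.pyGetD pa.2 2 0]
      else
        tmp_proj_stat.insert proj
          [PySem.List.pyGetD pa.2 1 0, PySem.List.pyGetD pa.2 2 0]) = pvStepM := by
  funext d pa
  simp only [pvStepM, PySem.Dict.modify]
  by_cases h : d.contains (pvProj pa.1)
  · have hv : d.getD (pvProj pa.1) [] = d.getD (pvProj pa.1) [0, 0] := by
      rcases hg : d.get? (pvProj pa.1) with _ | v
      · rw [PySem.Dict.contains_eq_isSome_get?, hg] at h
        simp at h
      · simp [PySem.Dict.getD_eq_get?_getD, hg]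
    simp [h, hv]
  · have hf : d.contains (pvProj pa.1) = false := by simpa using h
    simp [h, PySem.Dict.getD_of_not_contains _ _ hf, PySem.List.pyGetD]

-- running total of the modify-loop: the entry so far plus the filtered column sums
lemma pvGetD_fold (l : List (String × List Int)) (d : PySem.Dict String (List Int))
    (hd : ∀ q, ∃ x y, d.getD q [0, 0] = [x, y]) (p : String) (a b : Int)
    (hp : d.getD p [0, 0] = [a, b]) :
    (l.foldl pvStepM d).getD p [0, 0] =
      [a + ((l.filter (fun pa => pvProj pa.1 == p)).map (fun pa => PySem.List.pyGetD pa.2 1 0)).sum,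
       b + ((l.filter (fun pa => pvProj pa.1 == p)).map (fun pa => PySem.List.pyGetD pa.2 2 0)).sum] := by
  induction l generalizing d a b with
  | nil => simpa using hp
  | cons pa t ih =>
    simp only [List.foldl_cons, List.filter_cons]
    have hd' : ∀ q, ∃ x y, (pvStepM d pa).getD q [0, 0] = [x, y] := by
      intro q
      by_cases hq : q = pvProj pa.1
      · subst hq
        refine ⟨PySem.List.pyGetD (d.getD (pvProj pa.1) [0, 0]) 0 0 + PySem.List.pyGetD pa.2 1 0,
                PySem.List.pyGetD (d.getD (pvProj pa.1) [0, 0]) 1 0 + PySem.List.pyGetD pa.2 2 0, ?_⟩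
        simp [pvStepM, PySem.Dict.getD_modify_self]
      · exact (PySem.Dict.getD_modify_of_ne d _ _ hq) ▸ hd q
    by_cases h : pvProj pa.1 = p
    · subst h
      have hstep : (pvStepM d pa).getD (pvProj pa.1) [0, 0]
          = [a + PySem.List.pyGetD pa.2 1 0, b + PySem.List.pyGetD pa.2 2 0] := by
        simp [pvStepM, PySem.Dict.getD_modify_self, hp, PySem.List.pyGetD]
      rw [ih (pvStepM d pa) hd' _ _ hstep]
      simp [PySem.List.pyGetD]
      constructor <;> ring
    · have hne : p ≠ pvProj pa.1 := fun e => h e.symm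
      have hstep : (pvStepM d pa).getD p [0, 0] = [a, b] := by
        rw [pvStepM, PySem.Dict.getD_modify_of_ne d _ _ hne, hp]
      rw [ih (pvStepM d pa) hd' _ _ hstep]
      have hb : (pvProj pa.1 == p) = false := by simp [h]
      simp [hb]

theorem pv_main (stat : List (String × List Int)) :
    proj_author_stat_sum_by_proj stat = proj_author_stat_sum_by_proj_alt stat := by
  unfold proj_author_stat_sum_by_proj proj_author_stat_sum_by_proj_alt
  rw [pvStepA_eq_stepM]
  have hshape : stat.foldl pvStepM PySem.Dict.empty
      = stat.foldl (fun d pa => d.modify (pvProj pa.1) [0, 0] (fun cur =>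
          [PySem.List.pyGetD cur 0 0 + PySem.List.pyGetD pa.2 1 0,
           PySem.List.pyGetD cur 1 0 + PySem.List.pyGetD pa.2 2 0])) PySem.Dict.empty := rfl
  have hnd : (stat.foldl pvStepM PySem.Dict.empty).keys.Nodup := by
    rw [hshape]
    exact PySem.Dict.nodup_keys_foldl_modify_key stat (fun pa => pvProj pa.1) [0, 0]
      (fun _ pa => (fun cur =>
        [PySem.List.pyGetD cur 0 0 + PySem.List.pyGetD pa.2 1 0,
         PySem.List.pyGetD cur 1 0 + PySem.List.pyGetD pa.2 2 0])) PySem.Dict.empty (by simp)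
  have hkeys : (stat.foldl pvStepM PySem.Dict.empty).keys
      = PySem.Set.ofList (stat.map (fun pa => pvProj pa.1)) := by
    rw [hshape, PySem.Dict.keys_foldl_modify_key]
    simp [PySem.Set.update_nil_left]
  rw [PySem.Dict.items_eq_map_keys _ hnd [0, 0], hkeys, PySem.List.dedup_eq_ofList]
  apply List.map_congr_left
  intro p _
  rw [pvGetD_fold stat PySem.Dict.empty
        (fun q => ⟨0, 0, PySem.Dict.getD_empty q [0, 0]⟩) p 0 0 (PySem.Dict.getD_empty p [0, 0])]
  simp

-- ===== VERDICT (by name: the statement is the Claim_ definition above) =====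
theorem proj_author_stat_sum_by_proj_spec : Claim_equal_proj_author_stat_sum_by_proj := by
  intro stat _ _
  exact pv_main stat
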